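-- pv_equiv track=rewrite | github.com/PWDSerialgamer07/EnigmaPy | main.py | encode_text
-- ===== SOURCE A (Python) =====
-- def encode_text(text, key):
--     encoded_text = ''
--     key_index = 0
--     for char in text:
--         encoded_char = chr(ord(char) ^ ord(key[key_index]))
--         # Convert to hexadecimal
--         encoded_text += encoded_char.encode('utf-8').hex()
--         key_index = (key_index + 1) % len(key)
--     return encoded_text
-- ===== SOURCE B (Python) =====
-- def encode_text(text, key):
--     # Chunked decomposition: walk the text in key-sized blocks; each block is
--     # XOR'd directly against the key with zip (no running key index), turned
--     # into bytes and hex'd in one shot; blocks are joined at the end.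
--     k = len(key)
--     pieces = []
--     start = 0
--     while start < len(text):
--         block = text[start:start + k]
--         pieces.append(bytes(ord(a) ^ ord(b) for a, b in zip(block, key)).hex())
--         start += k
--     return ''.join(pieces)
-- ===== Notes on version B (the rewrite author's own statement) =====
-- stated objective: faster
-- what changed: Replaces the per-character loop with a wrapped running key index and per-char chr/encode('utf-8')/hex concatenation by a chunked traversal: the text is cut into key-sized blocks, each block is zip-XORed against the whole key and bulk hex-encoded by one bytes(...).hex() call, and the block digests are joined once (fewer temporary string objects and one C-level hex conversion per block).
import Mathlib
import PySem

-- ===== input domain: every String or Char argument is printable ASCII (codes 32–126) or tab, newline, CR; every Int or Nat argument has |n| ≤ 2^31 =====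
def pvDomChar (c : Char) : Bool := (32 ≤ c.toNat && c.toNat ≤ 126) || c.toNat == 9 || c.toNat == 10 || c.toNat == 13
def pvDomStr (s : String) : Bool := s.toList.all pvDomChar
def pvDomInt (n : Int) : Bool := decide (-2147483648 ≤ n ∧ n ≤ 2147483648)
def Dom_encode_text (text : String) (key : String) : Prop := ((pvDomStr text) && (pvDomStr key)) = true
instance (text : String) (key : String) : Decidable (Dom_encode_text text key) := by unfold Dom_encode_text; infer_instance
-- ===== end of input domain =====

-- B replaces A's per-character loop with a running wrapped key index by a chunked traversal:
-- key-sized blocks of the text are zip-XORed against the whole key and bulk hex-encoded.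
-- ===== PORT A =====

-- one hex digit
def hexDigit (n : Nat) : Char :=
  if n < 10 then Char.ofNat (48 + n) else Char.ofNat (87 + n)

-- two-digit lowercase hex of a byte (Python bytes.hex() per byte)
def bHex (n : Nat) : String :=
  String.ofList [hexDigit (n / 16 % 16), hexDigit (n % 16)]

-- UTF-8 bytes of a code point (Python chr(n).encode('utf-8'))
def utf8Bytes (n : Nat) : List Nat :=
  if n < 128 then [n]
  else if n < 2048 then [192 + n / 64, 128 + n % 64]
  else if n < 65536 then [224 + n / 4096, 128 + n / 64 % 64, 128 + n % 64]
  else [240 + n / 262144, 128 + n / 4096 % 64, 128 + n / 64 % 64, 128 + n % 64]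

-- chr(n).encode('utf-8').hex()
def utf8Hex (n : Nat) : String := String.join ((utf8Bytes n).map bHex)

-- A's loop: accumulated string and wrapped key index (key[key_index] valid under Pre_)
def aGo (ks : List Char) : List Char → String → Nat → String
  | [], acc, _ => acc
  | c :: cs, acc, ki =>
      aGo ks cs (acc ++ utf8Hex (c.toNat ^^^ (ks.getD ki ' ').toNat)) ((ki + 1) % ks.length)

def encode_text (text : String) (key : String) : String :=
  aGo key.toList text.toList "" 0

-- ===== PORT B =====

-- hex digest of one block XORed against the key: bytes(ord(a)^ord(b) for a,b in zip(block,key)).hex()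
def blockHex (block ks : List Char) : String :=
  String.join ((List.zipWith (fun a b => a.toNat ^^^ b.toNat) block ks).map bHex)

-- B's while loop: start index advances by len(key); fuel = ts.length only makes it total
-- (at most one iteration per text character once len(key) ≥ 1; Python diverges when key = '').
-- block = text[start:start+k] with 0 ≤ start: exactly (ts.drop start).take k.
def bGo (ks ts : List Char) : Nat → Nat → List String
  | _, 0 => []
  | start, fuel + 1 =>
      if start < ts.length then
        blockHex ((ts.drop start).take ks.length) ks :: bGo ks ts (start + ks.length) fuel
      else []

def encode_text_alt (text : String) (key : String) : String :=
  String.join (bGo key.toList text.toList 0 text.toList.length)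

-- ===== PRECONDITION & SPEC =====
-- Pre_ excludes exactly the inputs where A raises IndexError (nonempty text with empty key).
def Pre_encode_text (text : String) (key : String) : Prop := key ≠ "" ∨ text = ""
instance (text : String) (key : String) : Decidable (Pre_encode_text text key) := by
  unfold Pre_encode_text; infer_instance
def pvWitness_encode_text : String × String := ("hi", "k")
def Spec_encode_text (text : String) (key : String) (out : String) : Prop := out = encode_text_alt text key
instance (text : String) (key : String) (out : String) : Decidable (Spec_encode_text text key out) := by unfold Spec_encode_text; infer_instance

-- ===== CLAIM (what is proved, stated in full; the proofs are below) =====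
def Claim_equal_encode_text : Prop := ∀ (text : String) (key : String), Dom_encode_text text key → Pre_encode_text text key → Spec_encode_text text key (encode_text text key)

-- ===== LEMMAS AND PROOFS =====

-- reference form: per-character list of two-digit hex strings, wrapped key index
def refGo (ks : List Char) : List Char → Nat → List String
  | [], _ => []
  | c :: cs, i => bHex (c.toNat ^^^ (ks.getD (i % ks.length) ' ').toNat) :: refGo ks cs (i + 1)

lemma xor_lt_128 {a b : Nat} (ha : a < 128) (hb : b < 128) : a ^^^ b < 128 :=
  Nat.xor_lt_two_pow (n := 7) ha hb

lemma dom_char_lt {c : Char} (h : pvDomChar c = true) : c.toNat < 128 := by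
  simp [pvDomChar] at h; omega

lemma utf8Hex_small {n : Nat} (h : n < 128) : utf8Hex n = bHex n := by
  simp [utf8Hex, utf8Bytes, h, String.join]

lemma strFoldl_append (l : List String) : ∀ a : String,
    l.foldl (fun r s => r ++ s) a = a ++ l.foldl (fun r s => r ++ s) "" := by
  induction l with
  | nil => intro a; simp
  | cons x l ih =>
    intro a
    simp only [List.foldl_cons]
    rw [ih (a ++ x), ih ("" ++ x)]
    simp [String.append_assoc]

lemma join_append (l m : List String) :
    String.join (l ++ m) = String.join l ++ String.join m := by
  simp only [String.join, List.foldl_append]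
  rw [strFoldl_append]

-- A's loop computes the reference form (on Dom every XOR'd code point is < 128)
lemma aGo_eq (ks : List Char) (hk : ks ≠ []) (hks : ks.all pvDomChar = true) :
    ∀ (cs : List Char) (acc : String) (i : Nat), cs.all pvDomChar = true →
      aGo ks cs acc (i % ks.length) = acc ++ String.join (refGo ks cs i) := by
  intro cs
  induction cs with
  | nil => intro acc i _; simp [aGo, refGo, String.join]
  | cons c cs ih =>
    intro acc i hall
    simp only [List.all_cons, Bool.and_eq_true] at hall
    have hlen : 0 < ks.length := List.length_pos_iff.mpr hk
    have hilt : i % ks.length < ks.length := Nat.mod_lt _ hlen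
    have hkc : pvDomChar (ks.getD (i % ks.length) ' ') = true := by
      have hmem : ks.getD (i % ks.length) ' ' ∈ ks := by
        rw [List.getD_eq_getElem?_getD, List.getElem?_eq_getElem hilt]
        exact List.getElem_mem hilt
      exact List.all_eq_true.mp hks _ hmem
    have hx : c.toNat ^^^ (ks.getD (i % ks.length) ' ').toNat < 128 :=
      xor_lt_128 (dom_char_lt hall.1) (dom_char_lt hkc)
    have hstep : (i % ks.length + 1) % ks.length = (i + 1) % ks.length :=
      Nat.mod_add_mod i ks.length 1
    rw [aGo, hstep, ih _ (i + 1) hall.2, refGo, utf8Hex_small hx]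
    simp only [String.join, List.foldl_cons]
    simp only [String.append_assoc]
    rw [← strFoldl_append (refGo ks cs (i + 1))]
    simp

-- the reference form only depends on the key index modulo the key length
lemma refGo_mod (ks : List Char) : ∀ (cs : List Char) (i : Nat),
    refGo ks cs i = refGo ks cs (i % ks.length) := by
  intro cs
  induction cs with
  | nil => intro i; rfl
  | cons c cs ih =>
    intro i
    simp only [refGo]
    rw [ih (i + 1), ih (i % ks.length + 1), Nat.mod_add_mod, Nat.mod_mod_of_dvd _ (dvd_refl _)]

-- one key-sized chunk of the reference form is the zip of the text against the key suffix
lemma refGo_chunk_aux (ks : List Char) :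
    ∀ (rest cs : List Char) (i : Nat), i + rest.length = ks.length → ks.drop i = rest →
      refGo ks cs i =
        List.zipWith (fun a b => bHex (a.toNat ^^^ b.toNat)) cs rest
          ++ refGo ks (cs.drop rest.length) 0 := by
  intro rest
  induction rest with
  | nil =>
    intro cs i hlen hdrop
    have : i = ks.length := by simpa using hlen
    subst this
    rw [refGo_mod ks cs ks.length, Nat.mod_self]
    simp
  | cons r rs ih =>
    intro cs i hlen hdrop
    cases cs with
    | nil => simp [refGo]
    | cons c cs' =>
      have hlt : i < ks.length := by simp at hlen; omega
      have hr : ks.getD i ' ' = r := by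
        have h0 : ks[i]? = some r := by
          have := congrArg (fun l => l[0]?) hdrop
          simpa [List.getElem?_drop] using this
        simp [List.getD_eq_getElem?_getD, h0]
      have hdrop' : ks.drop (i + 1) = rs := by
        have : (ks.drop i).drop 1 = rs := by rw [hdrop]; simp
        simpa [List.drop_drop, Nat.add_comm] using this
      rw [refGo, Nat.mod_eq_of_lt hlt, hr,
        ih cs' (i + 1) (by simp at hlen ⊢; omega) hdrop']
      simp [List.zipWith]
  
-- specialisation to a full chunk starting at key index 0
lemma refGo_chunk (ks : List Char) (cs : List Char) :
    refGo ks cs 0 =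
      List.zipWith (fun a b => bHex (a.toNat ^^^ b.toNat)) cs ks
        ++ refGo ks (cs.drop ks.length) 0 :=
  refGo_chunk_aux ks ks cs 0 (by simp) (by simp)

-- zipping against the key only sees the first key-length characters of the block
lemma zipWith_take {α β γ : Type} (f : α → β → γ) :
    ∀ (l : List α) (m : List β), List.zipWith f (l.take m.length) m = List.zipWith f l m := by
  intro l
  induction l with
  | nil => intro m; simp
  | cons a l ih =>
    intro m
    cases m with
    | nil => simp
    | cons b m => simp [List.zipWith, ih m]

lemma blockHex_eq (block ks : List Char) :
    blockHex block ks =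
      String.join (List.zipWith (fun a b => bHex (a.toNat ^^^ b.toNat)) block ks) := by
  simp [blockHex, List.map_zipWith]

-- B's fuelled while loop joins to the reference form
lemma bGo_eq (ks : List Char) (hk : ks ≠ []) :
    ∀ (fuel : Nat) (ts : List Char) (start : Nat),
      ts.length ≤ start + fuel * ks.length →
      String.join (bGo ks ts start fuel) = String.join (refGo ks (ts.drop start) 0) := by
  intro fuel
  induction fuel with
  | zero =>
    intro ts start h
    simp only [Nat.zero_mul, Nat.add_zero] at h
    rw [List.drop_eq_nil_of_le h]
    simp [bGo, refGo, String.join]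
  | succ fuel ih =>
    intro ts start h
    have hlen : 0 < ks.length := List.length_pos_iff.mpr hk
    by_cases hs : start < ts.length
    · rw [bGo, if_pos hs]
      have hrec : ts.length ≤ start + ks.length + fuel * ks.length := by
        have := h; nlinarith
      rw [show (bGo ks ts (start + ks.length) fuel) = bGo ks ts (start + ks.length) fuel from rfl]
      have hj : String.join (blockHex ((ts.drop start).take ks.length) ks :: bGo ks ts (start + ks.length) fuel)
          = blockHex ((ts.drop start).take ks.length) ks ++ String.join (bGo ks ts (start + ks.length) fuel) := by
        simpa using join_append [blockHex ((ts.drop start).take ks.length) ks] (bGo ks ts (start + ks.length) fuel)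
      rw [hj, ih ts (start + ks.length) hrec]
      rw [refGo_chunk ks (ts.drop start), join_append]
      rw [blockHex_eq]
      rw [show List.zipWith (fun a b => bHex (a.toNat ^^^ b.toNat)) ((ts.drop start).take ks.length) ks
            = List.zipWith (fun a b => bHex (a.toNat ^^^ b.toNat)) (ts.drop start) ks from
          zipWith_take _ (ts.drop start) ks]
      rw [List.drop_drop]
    · rw [bGo, if_neg hs]
      rw [List.drop_eq_nil_of_le (by omega)]
      simp [refGo, String.join]

-- ===== VERDICT (by name: the statement is the Claim_ definition above) =====
theorem encode_text_spec : Claim_equal_encode_text := by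
  intro text key hdom hpre
  unfold Spec_encode_text encode_text encode_text_alt
  simp only [Dom_encode_text, Bool.and_eq_true] at hdom
  rcases hpre with hk | ht
  · have hk' : key.toList ≠ [] := by
      intro h; exact hk (String.toList_eq_nil_iff.mp h)
    have hlen : 0 < key.toList.length := List.length_pos_iff.mpr hk'
    have hA := aGo_eq key.toList hk' hdom.2 text.toList "" 0 hdom.1
    rw [Nat.zero_mod] at hA
    have hB := bGo_eq key.toList hk' text.toList.length text.toList 0 (by nlinarith)
    rw [hA, hB]
    simp
  · subst ht
    simp [aGo, bGo, String.join]
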